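-- pv_equiv track=rewrite | github.com/Ag3497120/verantyx-v6 | arc/world_commands.py | _extract_panels_h
-- ===== SOURCE A (Python) =====
-- from collections import Counter, defaultdict
--
-- def _bg(g):
--     c = Counter()
--     for row in g: c.update(row)
--     return c.most_common(1)[0][0]
--
-- def _find_sep_rows(g, bg):
--     h,w=len(g),len(g[0])
--     sep=[]
--     for r in range(h):
--         row_colors=set(g[r])
--         if len(row_colors)==1 and g[r][0]!=bg:
--             sep.append((r,g[r][0]))
--     return sep
--
-- def _extract_panels_h(g):
--     bg=_bg(g); h,w=len(g),len(g[0])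
--     seps=_find_sep_rows(g,bg)
--     if not seps: return [g]
--     bounds=[-1]+[r for r,_ in seps]+[h]
--     panels=[]
--     for i in range(len(bounds)-1):
--         rs,re=bounds[i]+1,bounds[i+1]
--         if rs<re: panels.append([g[r][:] for r in range(rs,re)])
--     return panels
-- ===== SOURCE B (Python) =====
-- from collections import Counter
--
-- def _bg(g):
--     c = Counter()
--     for row in g: c.update(row)
--     return c.most_common(1)[0][0]
--
-- def _extract_panels_h(g):
--     # single streaming pass: accumulate non-separator rows, flush a panel at each separator row
--     bg = _bg(g)
--     panels = []
--     current = []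
--     for row in g:
--         if len(set(row)) == 1 and row[0] != bg:
--             if current:
--                 panels.append(current)
--                 current = []
--         else:
--             current.append(row[:])
--     if current:
--         panels.append(current)
--     return panels
-- ===== Notes on version B (the rewrite author's own statement) =====
-- stated objective: simpler
-- what changed: A locates separator-row indices, builds a bounds list and slices the grid by index arithmetic in a second pass; B makes one streaming pass over the rows, flushing an accumulator panel at each separator row (keeping _bg verbatim).
-- outside the precondition, e.g. on _extract_panels_h([]): A raises IndexError, B raises IndexError; on _extract_panels_h([[], []]): A raises IndexError, B raises IndexError
import Mathlib
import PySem

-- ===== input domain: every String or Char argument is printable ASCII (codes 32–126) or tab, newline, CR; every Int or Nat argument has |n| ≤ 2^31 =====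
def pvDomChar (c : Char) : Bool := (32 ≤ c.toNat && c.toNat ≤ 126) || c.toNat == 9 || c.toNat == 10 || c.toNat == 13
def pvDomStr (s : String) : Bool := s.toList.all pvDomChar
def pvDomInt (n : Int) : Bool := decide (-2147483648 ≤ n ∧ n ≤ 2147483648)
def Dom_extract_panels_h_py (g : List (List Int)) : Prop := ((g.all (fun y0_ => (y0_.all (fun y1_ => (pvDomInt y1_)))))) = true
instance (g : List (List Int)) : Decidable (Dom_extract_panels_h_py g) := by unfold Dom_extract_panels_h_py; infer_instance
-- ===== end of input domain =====

-- B replaces A's find-separator-indices / build-bounds / slice-by-index pipeline with a single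
-- streaming pass over the rows that flushes an accumulator panel at each separator row
-- (objective: simpler — no index arithmetic, one traversal of the grid).

-- ===== PORT A =====
-- shared helper: _bg(g) (identical in Source A and Source B).  Counter iterates rows then elements
-- (first-insertion key order); most_common(1)[0][0] is the FIRST key with maximal count in
-- insertion order (heapq.nlargest(1) is a stable max), ported as a strict-improvement scan over
-- c.items.  On a grid with no cells Python raises IndexError (excluded by Pre_); the port
-- returns 0 there.
def bg_of (g : List (List Int)) : Int :=
  let c : PySem.Dict Int Int :=
    g.foldl (fun d row => row.foldl (fun d x => PySem.Dict.modify d x 0 (· + 1)) d) PySem.Dict.empty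
  match c.items with
  | [] => 0
  | it :: rest => (rest.foldl (fun best q => if best.2 < q.2 then q else best) it).1

-- _find_sep_rows of Source A (w = len(g[0]) is computed but unused; g[r][0] is only read under
-- len(set(g[r])) == 1, so the row is nonempty there and pyGetD with a default is exact)
def find_sep_rows_py (g : List (List Int)) (bg : Int) : List (Int × Int) :=
  let h : Int := g.length
  (PySem.List.pyRange 0 h).foldl (fun sep r =>
    let row := PySem.List.pyGetD g r []
    if ((PySem.Set.ofList row).length == 1) && (PySem.List.pyGetD row 0 0 != bg)
    then sep ++ [(r, PySem.List.pyGetD row 0 0)] else sep) []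

-- _extract_panels_h of Source A (g[r][:] is a copy, value-equal to g[r])
def extract_panels_h_py (g : List (List Int)) : List (List (List Int)) :=
  let bg := bg_of g
  let h : Int := g.length
  let seps := find_sep_rows_py g bg
  if seps.isEmpty then [g]
  else
    let bounds : List Int := [-1] ++ seps.map (·.1) ++ [h]
    (PySem.List.pyRange 0 ((bounds.length : Int) - 1)).foldl (fun panels i =>
      let rs := PySem.List.pyGetD bounds i 0 + 1
      let re := PySem.List.pyGetD bounds (i + 1) 0
      if rs < re then panels ++ [(PySem.List.pyRange rs re).map (fun r => PySem.List.pyGetD g r [])]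
      else panels) []

-- ===== PORT B =====
-- _extract_panels_h of Source B: one pass; state = (finished panels, current accumulator)
def extract_panels_h_py_alt (g : List (List Int)) : List (List (List Int)) :=
  let bg := bg_of g
  let st := g.foldl (fun (st : List (List (List Int)) × List (List Int)) row =>
      if ((PySem.Set.ofList row).length == 1) && (PySem.List.pyGetD row 0 0 != bg)
      then (if st.2.isEmpty then st else (st.1 ++ [st.2], ([] : List (List Int))))
      else (st.1, st.2 ++ [row])) ([], [])
  if st.2.isEmpty then st.1 else st.1 ++ [st.2]

-- ===== PRECONDITION & SPEC =====
-- Pre_ excludes exactly the grids with no cells at all (g = [] or every row empty): there the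
-- Counter is empty and A's _bg raises IndexError on most_common(1)[0].
def Pre_extract_panels_h_py (g : List (List Int)) : Prop := g.flatten ≠ []
instance (g : List (List Int)) : Decidable (Pre_extract_panels_h_py g) := by
  unfold Pre_extract_panels_h_py; infer_instance

def pvWitness_extract_panels_h_py : List (List Int) := [[1, 1], [2, 2], [1, 3]]

def Spec_extract_panels_h_py (g : List (List Int)) (out : List (List (List Int))) : Prop :=
  out = extract_panels_h_py_alt g
instance (g : List (List Int)) (out : List (List (List Int))) : Decidable (Spec_extract_panels_h_py g out) := by
  unfold Spec_extract_panels_h_py; infer_instance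

-- ===== CLAIM (what is proved, stated in full; the proofs are below) =====
def Claim_equal_extract_panels_h_py : Prop :=
  ∀ (g : List (List Int)), Dom_extract_panels_h_py g → Pre_extract_panels_h_py g →
    Spec_extract_panels_h_py g (extract_panels_h_py g)

-- ===== LEMMAS AND PROOFS =====

-- the separator test, with background colour bg
def sepTest (bg : Int) (row : List Int) : Bool :=
  ((PySem.Set.ofList row).length == 1) && (PySem.List.pyGetD row 0 0 != bg)

-- indices (counted from absolute index k) of the rows satisfying p
def idxsFrom (p : List Int → Bool) (k : Int) : List (List Int) → List Int
  | [] => []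
  | a :: l => if p a then k :: idxsFrom p (k + 1) l else idxsFrom p (k + 1) l

-- (first segment, later segments): the rows split at (and without) the rows satisfying p
def splitSeg (p : List Int → Bool) : List (List Int) → List (List Int) × List (List (List Int))
  | [] => ([], [])
  | a :: l =>
    let r := splitSeg p l
    if p a then ([], r.1 :: r.2) else (a :: r.1, r.2)

theorem idxsFrom_lb (p : List Int → Bool) :
    ∀ (g : List (List Int)) (k x : Int), x ∈ idxsFrom p k g → k ≤ x := by
  intro g
  induction g with
  | nil => intro k x hx; simp [idxsFrom] at hx
  | cons a l ih =>
    intro k x hx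
    by_cases hp : p a = true <;> simp [idxsFrom, hp] at hx
    · rcases hx with rfl | hx
      · omega
      · have := ih (k + 1) x hx; omega
    · have := ih (k + 1) x hx; omega

theorem pyGetD_append_len (pre : List (List Int)) (row : List Int) (t : List (List Int)) :
    PySem.List.pyGetD (pre ++ row :: t) (pre.length : Int) [] = row := by
  rw [PySem.List.pyGetD_natCast]
  simp [List.getD_eq_getElem?_getD]

theorem idx_filter (P : List Int → Bool) :
    ∀ (g pre : List (List Int)),
      (PySem.List.pyRange (pre.length : Int) ((pre.length : Int) + (g.length : Int))).filter
          (fun r => P (PySem.List.pyGetD (pre ++ g) r []))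
        = idxsFrom P (pre.length : Int) g := by
  intro g
  induction g with
  | nil => intro pre; simp [idxsFrom, PySem.List.pyRange]
  | cons row t ih =>
    intro pre
    have hcons : PySem.List.pyRange (pre.length : Int) ((pre.length : Int) + ((row :: t).length : Int))
        = (pre.length : Int) :: PySem.List.pyRange ((pre.length : Int) + 1) ((pre.length : Int) + ((row :: t).length : Int)) := by
      apply PySem.List.pyRange_one_cons
      simp only [List.length_cons]
      push_cast
      omega
    rw [hcons]
    have htail := ih (pre ++ [row])
    have hlen : ((pre ++ [row]).length : Int) = (pre.length : Int) + 1 := by simp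
    rw [hlen] at htail
    have harr : ((pre ++ [row]) ++ t) = pre ++ row :: t := by simp
    rw [harr] at htail
    have hbnd : ((pre.length : Int) + 1) + (t.length : Int) = (pre.length : Int) + ((row :: t).length : Int) := by
      simp only [List.length_cons]
      push_cast
      omega
    rw [hbnd] at htail
    simp only [List.filter_cons, pyGetD_append_len, idxsFrom, htail]

theorem idx_filter0 (P : List Int → Bool) (g : List (List Int)) :
    (PySem.List.pyRange 0 (g.length : Int)).filter (fun r => P (PySem.List.pyGetD g r []))
      = idxsFrom P 0 g := by
  simpa using idx_filter P g []

theorem idxsFrom_nil_splitSeg (p : List Int → Bool) :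
    ∀ (g : List (List Int)) (k : Int), idxsFrom p k g = [] → splitSeg p g = (g, []) := by
  intro g
  induction g with
  | nil => intro k _; simp [splitSeg]
  | cons a l ih =>
    intro k h
    by_cases hp : p a = true
    · simp [idxsFrom, hp] at h
    · simp [idxsFrom, hp] at h
      simp [splitSeg, hp, ih (k + 1) h]

-- the i ↦ (bounds[i], bounds[i+1]) view of consecutive bounds is zip with the tail
theorem pairs_of_range (b : List Int) :
    (PySem.List.pyRange 0 ((b.length : Int) - 1)).map
        (fun i => (PySem.List.pyGetD b i 0, PySem.List.pyGetD b (i + 1) 0))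
      = b.zip b.tail := by
  cases b with
  | nil => simp [PySem.List.pyRange]
  | cons x l =>
    have hb : (((x :: l).length : Int) - 1) = ((l.length : Nat) : Int) := by simp
    rw [hb, PySem.List.pyRange_zero_natCast, List.map_map]
    apply List.ext_getElem
    · simp
    · intro i h1 h2
      have hi : i < l.length := by simpa using h1
      simp only [List.getElem_map, List.getElem_range, Function.comp_apply]
      have g1 : PySem.List.pyGetD (x :: l) ((i : Nat) : Int) 0 = (x :: l)[i] := by
        rw [PySem.List.pyGetD_natCast]
        exact List.getD_eq_getElem _ _ (by simp; omega)
      have g2 : PySem.List.pyGetD (x :: l) (((i : Nat) : Int) + 1) 0 = (x :: l)[i + 1] := by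
        have hcast : ((i : Nat) : Int) + 1 = ((i + 1 : Nat) : Int) := by push_cast; ring
        rw [hcast, PySem.List.pyGetD_natCast]
        exact List.getD_eq_getElem _ _ (by simp; omega)
      rw [g1, g2]
      simp [List.getElem_zip]

-- a slice between bounds is empty exactly when the bounds touch
theorem slice_isEmpty (gg : List (List Int)) (x y : Int) :
    (!((PySem.List.pyRange (x + 1) y).map (fun r => PySem.List.pyGetD gg r [])).isEmpty)
      = decide (x + 1 < y) := by
  by_cases hlt : x + 1 < y
  · rw [PySem.List.pyRange_one_cons hlt]
    simp [hlt]
  · rw [PySem.List.pyRange_one_eq_nil (by omega)]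
    simp [hlt]

-- A's panels loop over consecutive bounds = the nonempty slices, in order
theorem panels_fold (gg : List (List Int)) (bounds : List Int) :
    (PySem.List.pyRange 0 ((bounds.length : Int) - 1)).foldl (fun panels i =>
        let rs := PySem.List.pyGetD bounds i 0 + 1
        let re := PySem.List.pyGetD bounds (i + 1) 0
        if rs < re then panels ++ [(PySem.List.pyRange rs re).map (fun r => PySem.List.pyGetD gg r [])]
        else panels) []
      = ((bounds.zip bounds.tail).map
          (fun xy => (PySem.List.pyRange (xy.1 + 1) xy.2).map (fun r => PySem.List.pyGetD gg r []))).filter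
          (fun s => !s.isEmpty) := by
  have h1 : (PySem.List.pyRange 0 ((bounds.length : Int) - 1)).foldl (fun panels i =>
        let rs := PySem.List.pyGetD bounds i 0 + 1
        let re := PySem.List.pyGetD bounds (i + 1) 0
        if rs < re then panels ++ [(PySem.List.pyRange rs re).map (fun r => PySem.List.pyGetD gg r [])]
        else panels) []
      = [] ++ ((PySem.List.pyRange 0 ((bounds.length : Int) - 1)).filter
            (fun i => decide (PySem.List.pyGetD bounds i 0 + 1 < PySem.List.pyGetD bounds (i + 1) 0))).map
          (fun i => (PySem.List.pyRange (PySem.List.pyGetD bounds i 0 + 1) (PySem.List.pyGetD bounds (i + 1) 0)).map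
            (fun r => PySem.List.pyGetD gg r [])) :=
    PySem.List.foldl_append_ite
      (fun i => PySem.List.pyGetD bounds i 0 + 1 < PySem.List.pyGetD bounds (i + 1) 0)
      (fun i => (PySem.List.pyRange (PySem.List.pyGetD bounds i 0 + 1) (PySem.List.pyGetD bounds (i + 1) 0)).map
        (fun r => PySem.List.pyGetD gg r []))
      (PySem.List.pyRange 0 ((bounds.length : Int) - 1)) []
  rw [h1]
  have h2 : ((PySem.List.pyRange 0 ((bounds.length : Int) - 1)).filter
        (fun i => decide (PySem.List.pyGetD bounds i 0 + 1 < PySem.List.pyGetD bounds (i + 1) 0))).map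
      (fun i => (PySem.List.pyRange (PySem.List.pyGetD bounds i 0 + 1) (PySem.List.pyGetD bounds (i + 1) 0)).map
        (fun r => PySem.List.pyGetD gg r []))
      = (((PySem.List.pyRange 0 ((bounds.length : Int) - 1)).map
            (fun i => (PySem.List.pyGetD bounds i 0, PySem.List.pyGetD bounds (i + 1) 0))).filter
          (fun xy => decide (xy.1 + 1 < xy.2))).map
        (fun xy => (PySem.List.pyRange (xy.1 + 1) xy.2).map (fun r => PySem.List.pyGetD gg r [])) := by
    rw [List.filter_map, List.map_map]
    rfl
  rw [h2, pairs_of_range]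
  rw [List.filter_map]
  rw [List.nil_append]
  congr 1
  apply List.filter_congr
  intro xy _
  simp only [Function.comp_apply]
  exact (slice_isEmpty gg xy.1 xy.2).symm

-- the slices between consecutive bounds are exactly the segments of splitSeg
theorem slices_eq_segs (p : List Int → Bool) :
    ∀ (g pre : List (List Int)),
      ((((pre.length : Int) - 1) :: (idxsFrom p (pre.length : Int) g ++ [(pre.length : Int) + (g.length : Int)])).zip
          (idxsFrom p (pre.length : Int) g ++ [(pre.length : Int) + (g.length : Int)])).map
        (fun xy => (PySem.List.pyRange (xy.1 + 1) xy.2).map (fun r => PySem.List.pyGetD (pre ++ g) r []))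
      = (splitSeg p g).1 :: (splitSeg p g).2 := by
  intro g
  induction g with
  | nil =>
    intro pre
    have h1 : ((pre.length : Int) - 1) + 1 = (pre.length : Int) := by ring
    simp [idxsFrom, splitSeg, h1, PySem.List.pyRange_one_eq_nil (le_refl ((pre.length : Int)))]
  | cons row t ih =>
    intro pre
    have hend : (pre.length : Int) + ((row :: t).length : Int)
        = ((pre.length : Int) + 1) + (t.length : Int) := by
      simp only [List.length_cons]
      push_cast
      omega
    rw [hend]
    have htail := ih (pre ++ [row])
    have hlen : ((pre ++ [row]).length : Int) = (pre.length : Int) + 1 := by simp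
    rw [hlen] at htail
    have harr : ((pre ++ [row]) ++ t) = pre ++ row :: t := by simp
    rw [harr] at htail
    have hk : ((pre.length : Int) + 1) - 1 = (pre.length : Int) := by ring
    rw [hk] at htail
    by_cases hp : p row = true
    · -- separator row: a new bound at index pre.length, an empty leading slice
      have hidx : idxsFrom p (pre.length : Int) (row :: t)
          = (pre.length : Int) :: idxsFrom p ((pre.length : Int) + 1) t := by
        simp [idxsFrom, hp]
      rw [hidx]
      have hsp : splitSeg p (row :: t) = ([], (splitSeg p t).1 :: (splitSeg p t).2) := by
        simp [splitSeg, hp]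
      rw [hsp]
      simp only [List.cons_append, List.zip_cons_cons, List.map_cons]
      rw [htail]
      have h1 : ((pre.length : Int) - 1) + 1 = (pre.length : Int) := by ring
      simp [h1, PySem.List.pyRange_one_eq_nil (le_refl ((pre.length : Int)))]
    · -- ordinary row: it is prepended to the first slice
      have hidx : idxsFrom p (pre.length : Int) (row :: t)
          = idxsFrom p ((pre.length : Int) + 1) t := by
        simp [idxsFrom, hp]
      rw [hidx]
      obtain ⟨c, l'', hL⟩ :=
        List.exists_cons_of_ne_nil
          (l := idxsFrom p ((pre.length : Int) + 1) t ++ [((pre.length : Int) + 1) + (t.length : Int)])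
          (by simp)
      have hc : (pre.length : Int) + 1 ≤ c := by
        have hcmem : c ∈ idxsFrom p ((pre.length : Int) + 1) t ++ [((pre.length : Int) + 1) + (t.length : Int)] := by
          rw [hL]; exact List.mem_cons_self
        rcases List.mem_append.mp hcmem with hcm | hcm
        · exact idxsFrom_lb p t _ _ hcm
        · have : c = ((pre.length : Int) + 1) + (t.length : Int) := by simpa using hcm
          omega
      rw [hL] at htail ⊢
      simp only [List.zip_cons_cons, List.map_cons] at htail ⊢
      have hF := (List.cons_eq_cons.mp htail).1
      have hrest := (List.cons_eq_cons.mp htail).2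
      rw [hrest]
      have hsp : splitSeg p (row :: t) = (row :: (splitSeg p t).1, (splitSeg p t).2) := by
        simp [splitSeg, hp]
      rw [hsp]
      have hhead : (PySem.List.pyRange (((pre.length : Int) - 1) + 1) c).map
            (fun r => PySem.List.pyGetD (pre ++ row :: t) r [])
          = row :: (splitSeg p t).1 := by
        have h1 : ((pre.length : Int) - 1) + 1 = (pre.length : Int) := by ring
        rw [h1, PySem.List.pyRange_one_cons (by omega : (pre.length : Int) < c)]
        simp only [List.map_cons, pyGetD_append_len]
        rw [← hF]
      simp only [hhead]

theorem slices0 (p : List Int → Bool) (g : List (List Int)) :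
    (((-1 : Int) :: (idxsFrom p 0 g ++ [(g.length : Int)])).zip
        (idxsFrom p 0 g ++ [(g.length : Int)])).map
      (fun xy => (PySem.List.pyRange (xy.1 + 1) xy.2).map (fun r => PySem.List.pyGetD g r []))
      = (splitSeg p g).1 :: (splitSeg p g).2 := by
  have h := slices_eq_segs p g []
  simpa using h

-- streaming loop of B: flushing the accumulator at separators = keeping the nonempty segments
theorem b_loop (p : List Int → Bool) :
    ∀ (g : List (List Int)) (panels : List (List (List Int))) (current : List (List Int)),
      (let st := g.foldl (fun st row =>
          if p row then (if st.2.isEmpty then st else (st.1 ++ [st.2], ([] : List (List Int))))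
          else (st.1, st.2 ++ [row])) (panels, current)
        if st.2.isEmpty then st.1 else st.1 ++ [st.2])
      = panels ++ ((current ++ (splitSeg p g).1) :: (splitSeg p g).2).filter (fun s => !s.isEmpty) := by
  intro g
  induction g with
  | nil =>
    intro panels current
    cases current <;> simp [splitSeg]
  | cons row t ih =>
    intro panels current
    simp only [List.foldl_cons]
    by_cases hp : p row = true
    · by_cases hc : current.isEmpty
      · have hc' : current = [] := by simpa [List.isEmpty_iff] using hc
        subst hc'
        simp only [hp, if_true, List.isEmpty_nil]
        rw [ih panels []]
        simp [splitSeg, hp]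
      · simp only [hp, if_true, hc, if_false, Bool.false_eq_true]
        rw [ih (panels ++ [current]) []]
        have hcne : (!current.isEmpty) = true := by simp [hc]
        simp [splitSeg, hp, hcne, List.append_assoc]
    · simp only [hp, Bool.false_eq_true, if_false]
      rw [ih panels (current ++ [row])]
      have hsp : splitSeg p (row :: t) = (row :: (splitSeg p t).1, (splitSeg p t).2) := by
        simp [splitSeg, hp]
      rw [hsp]
      simp [List.append_assoc]

-- ===== VERDICT (by name: the statement is the Claim_ definition above) =====
theorem extract_panels_h_py_spec : Claim_equal_extract_panels_h_py := by
  intro g _ hpre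
  unfold Spec_extract_panels_h_py
  have hg : g ≠ [] := by
    intro h
    subst h
    exact hpre rfl
  have hB : extract_panels_h_py_alt g
      = [] ++ ((([] ++ (splitSeg (sepTest (bg_of g)) g).1) :: (splitSeg (sepTest (bg_of g)) g).2).filter
          (fun s => !s.isEmpty)) := b_loop (sepTest (bg_of g)) g [] []
  have hsep : find_sep_rows_py g (bg_of g)
      = (idxsFrom (sepTest (bg_of g)) 0 g).map
          (fun r => (r, PySem.List.pyGetD (PySem.List.pyGetD g r []) 0 0)) := by
    have h1 : find_sep_rows_py g (bg_of g)
        = [] ++ ((PySem.List.pyRange 0 (g.length : Int)).filter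
              (fun r => sepTest (bg_of g) (PySem.List.pyGetD g r []))).map
            (fun r => (r, PySem.List.pyGetD (PySem.List.pyGetD g r []) 0 0)) :=
      PySem.List.foldl_append_if
        (fun r => sepTest (bg_of g) (PySem.List.pyGetD g r []))
        (fun r => (r, PySem.List.pyGetD (PySem.List.pyGetD g r []) 0 0))
        (PySem.List.pyRange 0 (g.length : Int)) []
    rw [h1, idx_filter0]
    rw [List.nil_append]
  by_cases hempty : (find_sep_rows_py g (bg_of g)).isEmpty
  · -- no separator rows: A returns [g]; B's single accumulated panel is g
    have hidx : idxsFrom (sepTest (bg_of g)) 0 g = [] := by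
      rw [hsep] at hempty
      simpa using hempty
    have hA : extract_panels_h_py g = [g] := by
      unfold extract_panels_h_py
      rw [if_pos hempty]
    rw [hA, hB, idxsFrom_nil_splitSeg _ g 0 hidx]
    simp [hg]
  · have hA : extract_panels_h_py g
        = ((((-1 : Int) :: ((find_sep_rows_py g (bg_of g)).map (·.1) ++ [(g.length : Int)])).zip
              ((find_sep_rows_py g (bg_of g)).map (·.1) ++ [(g.length : Int)])).map
            (fun xy => (PySem.List.pyRange (xy.1 + 1) xy.2).map (fun r => PySem.List.pyGetD g r []))).filter
            (fun s => !s.isEmpty) := by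
      unfold extract_panels_h_py
      rw [if_neg hempty]
      exact panels_fold g ((-1 : Int) :: ((find_sep_rows_py g (bg_of g)).map (·.1) ++ [(g.length : Int)]))
    have hfst : (find_sep_rows_py g (bg_of g)).map (·.1) = idxsFrom (sepTest (bg_of g)) 0 g := by
      rw [hsep, List.map_map]
      exact List.map_id'' (fun x => rfl) _
    rw [hA, hfst, slices0, hB]
    rw [List.nil_append, List.nil_append]
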